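-- pv_equiv track=rewrite | github.com/Poissonismyson/simplesso-su-python | simplesso.py | find_base
-- ===== SOURCE A (Python) =====
-- def find_base(m, tipo='b'): # tipo = 'b' per base, 'c' per non base
--     x_b = [-1] * len(m)
--     x_n = []
--
--     for j in range(len(m[0])):
--         col = [m[i][j] for i in range(len(m))]
--         if col.count(1) == 1 and col.count(0) == len(col) - 1:
--             posizione = col.index(1)
--             if x_b[posizione] == -1:
--                 x_b[posizione] = j
--             else:
--                 x_n.append(j)
--         else:
--             x_n.append(j)
--     if tipo == 'c':
--         return x_n
--     else:
--         return x_b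
-- ===== SOURCE B (Python) =====
-- def _fb_step(t, v, i):
--     ones, zeros, pos = t
--     if v == 1:
--         return (ones + 1, zeros, i if pos == -1 else pos)
--     elif v == 0:
--         return (ones, zeros + 1, pos)
--     else:
--         return t
--
-- def find_base(m, tipo='b'):  # tipo = 'b' per base, 'c' per non base
--     ncols = len(m[0])
--     # single row-major pass: per column (count of 1s, count of 0s, row of first 1)
--     table = [(0, 0, -1)] * ncols
--     for i, row in enumerate(m):
--         table = [_fb_step(t, row[j], i) for j, t in enumerate(table)]
--     x_b = [-1] * len(m)
--     x_n = []
--     for j, (ones, zeros, pos) in enumerate(table):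
--         if ones == 1 and zeros == len(m) - 1:
--             if x_b[pos] == -1:
--                 x_b[pos] = j
--             else:
--                 x_n.append(j)
--         else:
--             x_n.append(j)
--     return x_n if tipo == 'c' else x_b
-- ===== Notes on version B (the rewrite author's own statement) =====
-- stated objective: alternative
-- what changed: Replaces A's column-major scan, which materialises each column and traverses it three times (count(1), count(0), index(1)), by a single row-major pass that maintains a per-column table of (ones, zeros, row of first 1) followed by one loop over that table.
import Mathlib
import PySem

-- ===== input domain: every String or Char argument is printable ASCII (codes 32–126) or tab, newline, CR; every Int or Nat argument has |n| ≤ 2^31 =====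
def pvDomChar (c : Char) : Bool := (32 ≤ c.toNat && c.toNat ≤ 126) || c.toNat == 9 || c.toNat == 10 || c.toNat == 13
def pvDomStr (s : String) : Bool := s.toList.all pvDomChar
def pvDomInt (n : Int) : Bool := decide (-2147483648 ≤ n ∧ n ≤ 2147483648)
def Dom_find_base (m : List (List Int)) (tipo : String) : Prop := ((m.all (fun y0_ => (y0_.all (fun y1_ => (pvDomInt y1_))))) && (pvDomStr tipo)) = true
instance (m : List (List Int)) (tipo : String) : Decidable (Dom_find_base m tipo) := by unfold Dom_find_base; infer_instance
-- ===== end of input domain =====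

-- B replaces A's column-major scan (which builds every column as a fresh list and scans it
-- three times with count/count/index) by a single row-major pass maintaining a per-column
-- table of (ones, zeros, row of first 1), followed by one loop over that table.

-- ===== PORT A =====
def find_base (m : List (List Int)) (tipo : String) : List Int :=
  let res :=
    (PySem.List.pyRange 0 (((PySem.List.pyGet? m 0).getD []).length : Int) 1).foldl
      (fun (st : List Int × List Int) j =>
        let col := (PySem.List.pyRange 0 ((m.length : Nat) : Int) 1).map
          (fun i => PySem.List.pyGetD (PySem.List.pyGetD m i []) j 0)
        if PySem.List.count col 1 = 1 ∧ PySem.List.count col 0 = col.length - 1 then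
          let posizione := (PySem.List.index? col 1).getD 0
          if PySem.List.pyGetD st.1 (posizione : Int) 0 = -1 then
            (PySem.List.pySetD st.1 (posizione : Int) j, st.2)
          else
            (st.1, st.2 ++ [j])
        else
          (st.1, st.2 ++ [j]))
      ((List.replicate m.length (-1) : List Int), ([] : List Int))
  if tipo = "c" then res.2 else res.1

-- ===== PORT B =====
-- helper _fb_step of Source B
def fbStep (t : Int × Int × Int) (v : Int) (i : Int) : Int × Int × Int :=
  if v = 1 then (t.1 + 1, t.2.1, if t.2.2 = -1 then i else t.2.2)
  else if v = 0 then (t.1, t.2.1 + 1, t.2.2)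
  else t

def find_base_alt (m : List (List Int)) (tipo : String) : List Int :=
  let ncols := ((PySem.List.pyGet? m 0).getD []).length
  let table := (PySem.List.enumerate m).foldl
    (fun (tbl : List (Int × Int × Int)) p =>
      (PySem.List.enumerate tbl).map (fun q => fbStep q.2 (PySem.List.pyGetD p.2 q.1 0) p.1))
    (List.replicate ncols ((0 : Int), (0 : Int), (-1 : Int)))
  let res := (PySem.List.enumerate table).foldl
    (fun (st : List Int × List Int) q =>
      if q.2.1 = 1 ∧ q.2.2.1 = (m.length : Int) - 1 then
        if PySem.List.pyGetD st.1 q.2.2.2 0 = -1 then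
          (PySem.List.pySetD st.1 q.2.2.2 q.1, st.2)
        else
          (st.1, st.2 ++ [q.1])
      else
        (st.1, st.2 ++ [q.1]))
    ((List.replicate m.length (-1) : List Int), ([] : List Int))
  if tipo = "c" then res.2 else res.1

-- ===== PRECONDITION & SPEC =====
-- Pre_ excludes exactly the inputs on which the Python A raises: empty m (IndexError on m[0])
-- and ragged m whose later rows are shorter than row 0 (IndexError on m[i][j]).
def Pre_find_base (m : List (List Int)) (tipo : String) : Prop :=
  m ≠ [] ∧ ∀ row ∈ m, (m.headD []).length ≤ row.length
instance (m : List (List Int)) (tipo : String) : Decidable (Pre_find_base m tipo) := by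
  unfold Pre_find_base; infer_instance
def pvWitness_find_base : List (List Int) × String := ([[1, 0], [0, 1]], "b")

def Spec_find_base (m : List (List Int)) (tipo : String) (out : List Int) : Prop := out = find_base_alt m tipo
instance (m : List (List Int)) (tipo : String) (out : List Int) : Decidable (Spec_find_base m tipo out) := by unfold Spec_find_base; infer_instance

-- ===== CLAIM (what is proved, stated in full; the proofs are below) =====
def Claim_equal_find_base : Prop := ∀ (m : List (List Int)) (tipo : String), Dom_find_base m tipo → Pre_find_base m tipo → Spec_find_base m tipo (find_base m tipo)

-- ===== LEMMAS AND PROOFS =====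

-- the j-th column of m, as both programs read it
def colAt (m : List (List Int)) (j : Nat) : List Int :=
  m.map (fun row => PySem.List.pyGetD row (j : Int) 0)

-- position of the first 1 of col, counted from s; -1 if absent
def posOf (col : List Int) (s : Int) : Int :=
  match PySem.List.index? col 1 with
  | some k => s + k
  | none => -1

-- B's accumulator run down one column
def statsGo (t : Int × Int × Int) (col : List Int) (s : Int) : Int × Int × Int :=
  match col with
  | [] => t
  | v :: vs => statsGo (fbStep t v s) vs (s + 1)

lemma enum_append {α : Type} (l1 l2 : List α) (s : Int) :
    PySem.List.enumerate (l1 ++ l2) s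
      = PySem.List.enumerate l1 s ++ PySem.List.enumerate l2 (s + l1.length) := by
  induction l1 generalizing s with
  | nil => simp [PySem.List.enumerate_nil]
  | cons x xs ih =>
      simp [PySem.List.enumerate_cons, ih, List.cons_append]
      ring_nf

lemma enum_map_range {β : Type} (g : Nat → β) (n : Nat) (s : Int) :
    PySem.List.enumerate ((List.range n).map g) s
      = (List.range n).map (fun j : Nat => ((s + (j : Int) : Int), g j)) := by
  induction n with
  | zero => simp [PySem.List.enumerate_nil]
  | succ k ih =>
      rw [List.range_succ, List.map_append, enum_append, ih]
      simp [PySem.List.enumerate_cons, PySem.List.enumerate_nil]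

lemma map_getD_range {α β : Type} (l : List α) (g : α → β) (d : α) :
    (List.range l.length).map (fun k => g (l.getD k d)) = l.map g := by
  induction l with
  | nil => simp
  | cons x xs ih =>
      rw [List.length_cons, List.range_succ_eq_map, List.map_cons, List.map_map]
      simpa using congrArg (List.cons (g x)) ih

lemma tbl_loop (rows : List (List Int)) (s : Int) (n : Nat) (g : Nat → Int × Int × Int) :
    (PySem.List.enumerate rows s).foldl
        (fun tbl p =>
          (PySem.List.enumerate tbl).map (fun q => fbStep q.2 (PySem.List.pyGetD p.2 q.1 0) p.1))
        ((List.range n).map g)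
      = (List.range n).map
          (fun j => statsGo (g j) (rows.map (fun row => PySem.List.pyGetD row (j : Int) 0)) s) := by
  induction rows generalizing s g with
  | nil => simp [PySem.List.enumerate_nil, statsGo]
  | cons r rs ih =>
      rw [PySem.List.enumerate_cons, List.foldl_cons]
      rw [show ((PySem.List.enumerate ((List.range n).map g)).map
            (fun q => fbStep q.2 (PySem.List.pyGetD r q.1 0) s))
          = (List.range n).map (fun j => fbStep (g j) (PySem.List.pyGetD r (j : Int) 0) s) by
        rw [enum_map_range]; simp [List.map_map]]
      rw [ih]
      simp [statsGo]

lemma statsGo_pos (col : List Int) (o z p s : Int) (hp : 0 ≤ p) :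
    statsGo (o, z, p) col s
      = (o + (List.count 1 col : Int), z + (List.count 0 col : Int), p) := by
  induction col generalizing o z s with
  | nil => simp [statsGo]
  | cons v vs ih =>
      have hpne : p ≠ -1 := by omega
      by_cases h1 : v = 1
      · subst h1
        simp [statsGo, fbStep, hpne, ih]
        ring
      · by_cases h0 : v = 0
        · subst h0
          simp [statsGo, fbStep, ih]
          ring
        · simp [statsGo, fbStep, h1, h0, ih]

lemma posOf_cons_one (vs : List Int) (s : Int) : posOf (1 :: vs) s = s := by
  unfold posOf
  rw [PySem.List.index?_cons_self]
  simp

lemma posOf_cons_ne {v : Int} (vs : List Int) (h : v ≠ 1) (s : Int) :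
    posOf (v :: vs) s = posOf vs (s + 1) := by
  unfold posOf
  rw [PySem.List.index?_cons_of_ne vs h]
  cases hix : PySem.List.index? vs 1 with
  | none => simp
  | some k => simp; ring

lemma statsGo_neg (col : List Int) (o z : Int) (s : Int) (hs : 0 ≤ s) :
    statsGo (o, z, -1) col s
      = (o + (List.count 1 col : Int), z + (List.count 0 col : Int), posOf col s) := by
  induction col generalizing o z s with
  | nil => simp [statsGo, posOf, PySem.List.index?]
  | cons v vs ih =>
      by_cases h1 : v = 1
      · subst h1
        rw [show statsGo (o, z, -1) (1 :: vs) s = statsGo (o + 1, z, s) vs (s + 1) by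
          simp [statsGo, fbStep]]
        rw [statsGo_pos vs (o + 1) z s (s + 1) hs, posOf_cons_one]
        simp
        ring
      · by_cases h0 : v = 0
        · subst h0
          rw [show statsGo (o, z, -1) (0 :: vs) s = statsGo (o, z + 1, -1) vs (s + 1) by
            simp [statsGo, fbStep]]
          rw [ih o (z + 1) (s + 1) (by omega), posOf_cons_ne vs (by norm_num)]
          simp
          ring
        · rw [show statsGo (o, z, -1) (v :: vs) s = statsGo (o, z, -1) vs (s + 1) by
            simp [statsGo, fbStep, h1, h0]]
          rw [ih o z (s + 1) (by omega), posOf_cons_ne vs h1]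
          simp [h1, h0]

lemma colA_eq (m : List (List Int)) (j : Int) :
    ((PySem.List.pyRange 0 ((m.length : Nat) : Int) 1).map
        (fun i => PySem.List.pyGetD (PySem.List.pyGetD m i []) j 0))
      = m.map (fun row => PySem.List.pyGetD row j 0) := by
  rw [PySem.List.pyRange_zero_nat, List.map_map]
  rw [← map_getD_range m (fun row => PySem.List.pyGetD row j 0) []]
  apply List.map_congr_left
  intro k _
  simp [PySem.List.pyGetD_natCast]

-- ===== VERDICT (by name: the statement is the Claim_ definition above) =====
theorem find_base_spec : Claim_equal_find_base := by
  intro m tipo _ _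
  unfold Spec_find_base find_base find_base_alt
  dsimp only
  rw [show (List.replicate (((PySem.List.pyGet? m 0).getD []).length) ((0 : Int), (0 : Int), (-1 : Int)))
        = (List.range (((PySem.List.pyGet? m 0).getD []).length)).map (fun _ => ((0 : Int), (0 : Int), (-1 : Int))) by
      simp]
  rw [tbl_loop]
  rw [show ((List.range (((PySem.List.pyGet? m 0).getD []).length)).map
        (fun j : Nat => statsGo ((0 : Int), (0 : Int), (-1 : Int))
          (m.map (fun row => PySem.List.pyGetD row (j : Int) 0)) 0))
      = ((List.range (((PySem.List.pyGet? m 0).getD []).length)).map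
        (fun j : Nat => (((List.count 1 (m.map (fun row => PySem.List.pyGetD row (j : Int) 0)) : Nat) : Int),
          ((List.count 0 (m.map (fun row => PySem.List.pyGetD row (j : Int) 0)) : Nat) : Int),
          posOf (m.map (fun row => PySem.List.pyGetD row (j : Int) 0)) 0))) by
      apply List.map_congr_left
      intro j _
      rw [statsGo_neg _ 0 0 0 le_rfl, zero_add, zero_add]]
  rw [enum_map_range]
  simp only [colA_eq]
  rw [PySem.List.pyRange_zero_nat]
  simp only [List.foldl_map, zero_add]
  refine congrArg (fun r : List Int × List Int => if tipo = "c" then r.2 else r.1)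
    (PySem.List.foldl_congr_mem _ _ _ _ ?_)
  intro st j _
  simp only [PySem.List.count_eq, List.length_map]
  have hc1le := List.count_le_length (l := m.map (fun row => PySem.List.pyGetD row (j : Int) 0)) (a := 1)
  have hc0le := List.count_le_length (l := m.map (fun row => PySem.List.pyGetD row (j : Int) 0)) (a := 0)
  rw [List.length_map] at hc1le hc0le
  set col := m.map (fun row => PySem.List.pyGetD row (j : Int) 0) with hcol
  by_cases hc : List.count 1 col = 1 ∧ List.count 0 col = m.length - 1
  · have hc' : ((List.count 1 col : Int) = 1 ∧ (List.count 0 col : Int) = (m.length : Int) - 1) := by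
      omega
    rw [if_pos hc, if_pos hc']
    have hmem : (1 : Int) ∈ col := by
      have : 0 < List.count 1 col := by omega
      exact List.count_pos_iff.mp this
    obtain ⟨k, hk⟩ := Option.isSome_iff_exists.mp ((PySem.List.index?_isSome_iff col 1).mpr hmem)
    have hpos : posOf col 0 = (k : Int) := by unfold posOf; rw [hk]; simp
    rw [hpos, hk]
    rfl
  · have hc' : ¬ ((List.count 1 col : Int) = 1 ∧ (List.count 0 col : Int) = (m.length : Int) - 1) := by
      omega
    rw [if_neg hc, if_neg hc']
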